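-- pv_equiv track=rewrite | github.com/antoinelfg/hybrid-sparse-vae | modules/layers.py | _build_stride_schedule
-- ===== SOURCE A (Python) =====
-- def _build_stride_schedule(
--     target_downsample: int | None,
--     n_blocks: int,
-- ) -> list[int]:
--     if target_downsample is None:
--         return [2] * n_blocks
--     if target_downsample < 1:
--         raise ValueError(f"temporal_downsample_factor must be >= 1, got {target_downsample}")
--
--     remaining = int(target_downsample)
--     strides = [1] * n_blocks
--     i = 0
--     while remaining > 1 and i < n_blocks:
--         if remaining % 2 != 0:
--             raise ValueError(
--                 "Encoder1D only supports power-of-two temporal_downsample_factor "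
--                 f"with the current ResBlock setup, got {target_downsample}"
--             )
--         strides[i] = 2
--         remaining //= 2
--         i += 1
--
--     if remaining != 1:
--         raise ValueError(
--             "Requested temporal_downsample_factor exceeds encoder capacity: "
--             f"target={target_downsample}, max={2 ** n_blocks}"
--         )
--     return strides
-- ===== SOURCE B (Python) =====
-- def _build_stride_schedule(
--     target_downsample: int | None,
--     n_blocks: int,
-- ) -> list[int]:
--     if target_downsample is None:
--         return [2] * n_blocks
--     n = int(target_downsample)
--     if n < 1:
--         raise ValueError(f"temporal_downsample_factor must be >= 1, got {target_downsample}")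
--     e = n.bit_length() - 1
--     if n != 1 << e:
--         raise ValueError(
--             "Encoder1D only supports power-of-two temporal_downsample_factor "
--             f"with the current ResBlock setup, got {target_downsample}"
--         )
--     if n == 1:
--         return [1] * n_blocks
--     if e > n_blocks:
--         raise ValueError(
--             "Requested temporal_downsample_factor exceeds encoder capacity: "
--             f"target={target_downsample}, max={2 ** n_blocks}"
--         )
--     return [2] * e + [1] * (n_blocks - e)
-- ===== Notes on version B (the rewrite author's own statement) =====
-- stated objective: simpler
-- what changed: Replaces the halve-and-mutate while-loop over a preallocated stride list with a closed-form exponent from n.bit_length(), a direct power-of-two check, and list construction by replication/concatenation.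
import Mathlib
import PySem

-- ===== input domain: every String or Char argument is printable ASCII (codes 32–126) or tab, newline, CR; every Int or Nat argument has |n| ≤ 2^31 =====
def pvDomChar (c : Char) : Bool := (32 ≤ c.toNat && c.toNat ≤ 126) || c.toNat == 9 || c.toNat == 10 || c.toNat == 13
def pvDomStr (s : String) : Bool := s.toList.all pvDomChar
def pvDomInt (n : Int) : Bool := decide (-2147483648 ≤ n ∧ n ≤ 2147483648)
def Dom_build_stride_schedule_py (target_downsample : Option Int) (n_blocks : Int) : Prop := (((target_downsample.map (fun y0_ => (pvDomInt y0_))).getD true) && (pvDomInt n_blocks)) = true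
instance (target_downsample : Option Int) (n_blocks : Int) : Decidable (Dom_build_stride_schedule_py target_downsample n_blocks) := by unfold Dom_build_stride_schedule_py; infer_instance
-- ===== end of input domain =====

-- B replaces A's halving while-loop with a closed-form bit_length exponent and list replication (objective: simpler).

-- ===== PORT A =====
-- the while-loop of A: returns none where Python raises the power-of-two ValueError,
-- otherwise some (final remaining, final strides)
def pvALoop (remaining : Int) (strides : List Int) (i : Int) (n_blocks : Int) : Option (Int × List Int) :=
  if h : remaining > 1 ∧ i < n_blocks then
    if PySem.Int.mod remaining 2 ≠ 0 then none   -- raise ValueError (power-of-two)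
    else pvALoop (PySem.Int.floordiv remaining 2) (strides.set i.toNat 2) (i + 1) n_blocks
  else some (remaining, strides)
termination_by (n_blocks - i).toNat
decreasing_by omega

def build_stride_schedule_py (target_downsample : Option Int) (n_blocks : Int) : List Int :=
  match target_downsample with
  | none => List.replicate n_blocks.toNat 2
  | some target =>
    if target < 1 then []   -- raise ValueError (must be >= 1); excluded by Pre_
    else
      match pvALoop target (List.replicate n_blocks.toNat 1) 0 n_blocks with
      | none => []          -- raise ValueError (power-of-two); excluded by Pre_
      | some (remaining, strides) =>
        if remaining ≠ 1 then []   -- raise ValueError (capacity); excluded by Pre_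
        else strides

-- ===== PORT B =====
def build_stride_schedule_py_alt (target_downsample : Option Int) (n_blocks : Int) : List Int :=
  match target_downsample with
  | none => List.replicate n_blocks.toNat 2
  | some n =>
    if n < 1 then []   -- raise ValueError (must be >= 1); excluded by Pre_
    else
      let e : Nat := PySem.Int.bitLength n - 1
      if n ≠ (2 : Int) ^ e then []   -- raise ValueError (power-of-two); excluded by Pre_
      else if n = 1 then List.replicate n_blocks.toNat 1
      else if (e : Int) > n_blocks then []   -- raise ValueError (capacity); excluded by Pre_
      else List.replicate e 2 ++ List.replicate (n_blocks - (e : Int)).toNat 1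

-- ===== PRECONDITION & SPEC =====
-- Pre_: exactly the inputs where A returns normally: no target, or a power-of-two target
-- ≥ 1 whose exponent fits into n_blocks (target 1 is fine for every n_blocks).
def Pre_build_stride_schedule_py (target_downsample : Option Int) (n_blocks : Int) : Prop :=
  target_downsample = none ∨
    (1 ≤ target_downsample.getD 0 ∧
     target_downsample.getD 0 = (2 : Int) ^ (PySem.Int.bitLength (target_downsample.getD 0) - 1) ∧
     (target_downsample.getD 0 = 1 ∨ ((PySem.Int.bitLength (target_downsample.getD 0) - 1 : Nat) : Int) ≤ n_blocks))
instance (target_downsample : Option Int) (n_blocks : Int) : Decidable (Pre_build_stride_schedule_py target_downsample n_blocks) := by unfold Pre_build_stride_schedule_py; infer_instance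

def pvWitness_build_stride_schedule_py : Option Int × Int := (some 4, 3)

def Spec_build_stride_schedule_py (target_downsample : Option Int) (n_blocks : Int) (out : List Int) : Prop := out = build_stride_schedule_py_alt target_downsample n_blocks
instance (target_downsample : Option Int) (n_blocks : Int) (out : List Int) : Decidable (Spec_build_stride_schedule_py target_downsample n_blocks out) := by unfold Spec_build_stride_schedule_py; infer_instance

-- ===== CLAIM (what is proved, stated in full; the proofs are below) =====
def Claim_equal_build_stride_schedule_py : Prop := ∀ (target_downsample : Option Int) (n_blocks : Int), Dom_build_stride_schedule_py target_downsample n_blocks → Pre_build_stride_schedule_py target_downsample n_blocks → Spec_build_stride_schedule_py target_downsample n_blocks (build_stride_schedule_py target_downsample n_blocks)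

-- ===== LEMMAS AND PROOFS =====

lemma pvSetRepl (a m : Nat) :
    (List.replicate a (2:Int) ++ List.replicate (m+1) (1:Int)).set a 2
      = List.replicate (a+1) 2 ++ List.replicate m 1 := by
  induction a with
  | zero => simp [List.replicate_succ]
  | succ a ih =>
    simp only [List.replicate_succ, List.cons_append, List.set_cons_succ] at *
    simp [ih]

lemma pvALoop_pow (k : Nat) : ∀ (i n_blocks : Int), 0 ≤ i → (k = 0 ∨ i + k ≤ n_blocks) →
    pvALoop ((2 : Int) ^ k) (List.replicate i.toNat 2 ++ List.replicate (n_blocks - i).toNat 1) i n_blocks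
      = some (1, List.replicate (i + k).toNat 2 ++ List.replicate (n_blocks - (i + k)).toNat 1) := by
  induction k with
  | zero =>
    intro i nb hi _
    rw [pvALoop, dif_neg (by norm_num)]
    simp
  | succ k ih =>
    intro i nb hi hk
    have hib : i + ((k:Int) + 1) ≤ nb := by
      cases hk with
      | inl h => omega
      | inr h => push_cast at h; omega
    have hlt : i < nb := by omega
    have hpow : (1:Int) < 2 ^ (k+1) := by
      calc (1:Int) < 2 := by norm_num
      _ ≤ 2 ^ (k+1) := le_self_pow₀ (by norm_num) (by omega)
    rw [pvALoop, dif_pos ⟨hpow, hlt⟩]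
    have hmod : PySem.Int.mod ((2:Int) ^ (k+1)) 2 = 0 := by
      rw [PySem.Int.mod_eq_emod_of_pos (by norm_num)]
      simp [pow_succ, Int.mul_emod_left]
    have hdiv : PySem.Int.floordiv ((2:Int) ^ (k+1)) 2 = 2 ^ k := by
      rw [PySem.Int.floordiv_eq_ediv_of_pos (by norm_num), pow_succ]
      exact Int.mul_ediv_cancel _ (by norm_num)
    rw [if_neg (by rw [ne_eq, hmod]; simp), hdiv]
    have hm : (nb - i).toNat = (nb - (i+1)).toNat + 1 := by omega
    rw [hm, pvSetRepl]
    have h1 : i.toNat + 1 = (i+1).toNat := by omega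
    rw [h1]
    have := ih (i+1) nb (by omega) (Or.inr (by omega))
    rw [this]
    have e1 : ((i + 1) + (k:Int)).toNat = (i + ((k+1 : Nat):Int)).toNat := by push_cast; omega
    have e2 : (nb - ((i + 1) + (k:Int))).toNat = (nb - (i + ((k+1 : Nat):Int))).toNat := by push_cast; omega
    rw [e1, e2]

theorem build_stride_schedule_py_spec : Claim_equal_build_stride_schedule_py := by
  intro t nb _ hpre
  unfold Spec_build_stride_schedule_py
  cases t with
  | none => rfl
  | some n =>
    rcases hpre with h | ⟨h1, hpow, hcase⟩
    · exact absurd h (by simp)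
    simp only [Option.getD_some] at h1 hpow hcase
    set e : Nat := PySem.Int.bitLength n - 1 with he
    have hn0 : ¬ n < 1 := by omega
    have hnpow : ¬ n ≠ (2:Int) ^ e := by simpa using hpow
    have harg : e = 0 ∨ (0:Int) + (e:Int) ≤ nb := by
      rcases hcase with h | h
      · left; rw [he, h]; decide
      · right; omega
    have hloop := pvALoop_pow e 0 nb le_rfl harg
    have hstart : List.replicate (Int.toNat 0) (2:Int) ++ List.replicate ((nb:Int) - 0).toNat (1:Int)
        = List.replicate nb.toNat 1 := by simp
    rw [hstart] at hloop
    have hA : build_stride_schedule_py (some n) nb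
        = List.replicate ((0:Int) + (e:Int)).toNat 2 ++ List.replicate (nb - ((0:Int) + (e:Int))).toNat 1 := by
      simp only [build_stride_schedule_py]
      rw [if_neg hn0, hpow, hloop]
      simp
    rw [hA]
    simp only [build_stride_schedule_py_alt]
    rw [if_neg hn0, if_neg hnpow]
    by_cases hn1 : n = 1
    · have he0 : e = 0 := by rw [he, hn1]; decide
      rw [if_pos hn1]
      simp [he0]
    · have hle : ((e:Nat):Int) ≤ nb := hcase.resolve_left hn1
      rw [if_neg hn1, if_neg (by omega)]
      have h0e : ((0:Int) + (e:Int)).toNat = e := by omega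
      rw [h0e]
      congr 2
      omega
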